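-- pv_equiv track=rewrite | github.com/funov/ascii-art | model/ascii_art_converter.py | get_color_to_symbol_dict
-- ===== SOURCE A (Python) =====
-- def get_color_to_symbol_dict(chars, different_pixels):
--     color_to_symbol = dict.fromkeys(
--         [different_pixels[j] for j in range(min(len(chars), len(different_pixels)))]
--     )
--
--     k = 0
--     for key in color_to_symbol.keys():
--         color_to_symbol[key] = chars[k]
--         k += 1
--
--     return color_to_symbol
-- ===== SOURCE B (Python) =====
-- def get_color_to_symbol_dict(chars, different_pixels):
--     # Recursive nub: the first pixel is unique; remove all its later duplicates
--     # by filtering, recurse on the rest. Then pair the unique keys with chars.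
--     def uniq(lst):
--         if not lst:
--             return []
--         head = lst[0]
--         return [head] + uniq([x for x in lst[1:] if x != head])
--
--     prefix = different_pixels[:min(len(chars), len(different_pixels))]
--     return dict(zip(uniq(prefix), chars))
-- ===== Notes on version B (the rewrite author's own statement) =====
-- stated objective: alternative
-- what changed: B computes the unique keys by a quicksort-style recursive nub (take the head, filter out all its later duplicates, recurse) on the sliced prefix and then builds the dict in one shot with dict(zip(keys, chars)), instead of A's imperative dict.fromkeys build followed by a key-indexed assignment loop.
import Mathlib
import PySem

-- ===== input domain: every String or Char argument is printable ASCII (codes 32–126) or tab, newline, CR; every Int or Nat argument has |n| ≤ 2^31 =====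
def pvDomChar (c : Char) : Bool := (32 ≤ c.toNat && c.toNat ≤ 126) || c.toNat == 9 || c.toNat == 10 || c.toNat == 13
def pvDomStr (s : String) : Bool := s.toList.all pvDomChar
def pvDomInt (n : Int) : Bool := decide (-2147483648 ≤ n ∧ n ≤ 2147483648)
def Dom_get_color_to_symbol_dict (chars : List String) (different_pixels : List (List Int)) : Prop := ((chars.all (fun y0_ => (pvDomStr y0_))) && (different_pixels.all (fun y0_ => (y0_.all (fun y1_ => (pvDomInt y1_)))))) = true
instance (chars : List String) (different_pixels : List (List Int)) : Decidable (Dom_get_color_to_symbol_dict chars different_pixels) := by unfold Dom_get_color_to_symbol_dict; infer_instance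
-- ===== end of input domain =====

-- B replaces A's dict.fromkeys-then-assign build with a recursive filter-nub of the sliced prefix zipped with chars; alternative decomposition, not faster.


-- ===== PORT A =====
-- loop body of A's second phase: color_to_symbol[key] = chars[k]; k += 1 (keys are distinct, so dict insert = append)
def pvAssign (chars : List String) (st : List (List Int × String) × Int) (key : List Int) : List (List Int × String) × Int :=
  (st.1 ++ [(key, PySem.List.pyGetD chars st.2 "")], st.2 + 1)

def get_color_to_symbol_dict (chars : List String) (different_pixels : List (List Int)) : List (List Int × String) :=
  -- dict.fromkeys([different_pixels[j] for j in range(min(len(chars), len(different_pixels)))])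
  let keys := PySem.List.dedup
    ((PySem.List.pyRange 0 (min (chars.length : Int) (different_pixels.length : Int)) 1).map
      (fun j => PySem.List.pyGetD different_pixels j []))
  -- k = 0; for key in keys: assign
  (keys.foldl (pvAssign chars) ([], 0)).1

-- ===== PORT B =====
-- B's recursive nub: head is unique, drop all its later duplicates by filtering, recurse
def pvUniq : List (List Int) → List (List Int)
  | [] => []
  | x :: xs => x :: pvUniq (xs.filter (fun y => !(y == x)))
termination_by xs => xs.length
decreasing_by simpa using Nat.lt_succ_of_le (le_trans (List.length_filter_le _ _) (Nat.le_of_eq List.length_attach))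

def get_color_to_symbol_dict_alt (chars : List String) (different_pixels : List (List Int)) : List (List Int × String) :=
  -- prefix = different_pixels[:min(len(chars), len(different_pixels))]
  let pfx := PySem.List.slice different_pixels none
    (some (min (chars.length : Int) (different_pixels.length : Int)))
  -- dict(zip(uniq(prefix), chars)): the keys are distinct, so the dict is the pair list itself
  (pvUniq pfx).zip chars

-- ===== PRECONDITION & SPEC =====
def Spec_get_color_to_symbol_dict (chars : List String) (different_pixels : List (List Int)) (out : List (List Int × String)) : Prop := out = get_color_to_symbol_dict_alt chars different_pixels
instance (chars : List String) (different_pixels : List (List Int)) (out : List (List Int × String)) : Decidable (Spec_get_color_to_symbol_dict chars different_pixels out) := by unfold Spec_get_color_to_symbol_dict; infer_instance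

-- ===== CLAIM (what is proved, stated in full; the proofs are below) =====
def Claim_equal_get_color_to_symbol_dict : Prop := ∀ (chars : List String) (different_pixels : List (List Int)), Dom_get_color_to_symbol_dict chars different_pixels → Spec_get_color_to_symbol_dict chars different_pixels (get_color_to_symbol_dict chars different_pixels)

-- ===== LEMMAS AND PROOFS =====

-- unfolding equation for the well-founded pvUniq
theorem pvUniq_cons (x : List Int) (xs : List (List Int)) :
    pvUniq (x :: xs) = x :: pvUniq (xs.filter (fun y => !(y == x))) := by
  simp [pvUniq]

-- the sliced comprehension in A is a take of the pixel list
theorem pv_map_range_take (dp : List (List Int)) (n : Int) (_h0 : 0 ≤ n) (h1 : n ≤ (dp.length : Int)) :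
    (PySem.List.pyRange 0 n 1).map (fun j => PySem.List.pyGetD dp j []) = dp.take n.toNat := by
  rw [PySem.List.pyRange_one, List.map_map]
  apply List.ext_getElem
  · simp; omega
  · intro i hi1 hi2
    simp only [List.length_map, List.length_range] at hi1
    simp only [List.getElem_map, List.getElem_range, Function.comp_apply, List.getElem_take]
    rw [PySem.List.pyGetD_eq_getElem dp [] (by omega) (by omega)]
    simp

-- A's fold of Set.add = B's recursive nub of the elements not already seen
theorem pv_foldl_add_eq_uniq (xs : List (List Int)) : ∀ (acc : List (List Int)),
    List.foldl PySem.Set.add acc xs = acc ++ pvUniq (xs.filter (fun x => !(PySem.Set.contains acc x))) := by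
  induction xs with
  | nil => intro acc; simp [pvUniq]
  | cons x xs ih =>
    intro acc
    simp only [List.foldl_cons, PySem.Set.add, List.filter_cons]
    by_cases hc : PySem.Set.contains acc x = true
    · simp only [hc, if_true, Bool.not_true, Bool.false_eq_true, if_false]
      exact ih acc
    · rw [Bool.not_eq_true] at hc
      simp only [hc, Bool.false_eq_true, if_false, Bool.not_false, if_true]
      have hf : ∀ y ∈ xs, (!PySem.Set.contains (acc ++ [x]) y) = (!(y == x) && !PySem.Set.contains acc y) := by
        intro y _
        simp only [PySem.Set.contains, List.contains_append, List.contains_cons,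
          List.contains_nil, Bool.or_false, Bool.not_or, Bool.and_comm]
      rw [ih (acc ++ [x]), List.filter_congr hf, ← List.filter_filter,
        List.append_assoc, List.singleton_append, pvUniq_cons]

-- the nub never lengthens a list
theorem pv_uniq_length_le : ∀ (n : Nat) (xs : List (List Int)), xs.length ≤ n → (pvUniq xs).length ≤ xs.length := by
  intro n
  induction n with
  | zero =>
    intro xs h
    cases xs with
    | nil => simp [pvUniq]
    | cons x xs => simp at h
  | succ n ih =>
    intro xs h
    cases xs with
    | nil => simp [pvUniq]
    | cons x xs =>
      rw [pvUniq_cons]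
      simp only [List.length_cons] at h ⊢
      have h1 := List.length_filter_le (fun y => !(y == x)) xs
      exact Nat.succ_le_succ (le_trans (ih _ (by omega)) h1)

-- A's assignment loop over distinct keys is zipping the keys with chars
theorem pv_assign_eq_zip (chars : List String) :
    ∀ (keys : List (List Int)) (acc : List (List Int × String)) (k : Nat),
    k + keys.length ≤ chars.length →
    (keys.foldl (pvAssign chars) (acc, (k : Int))).1 = acc ++ keys.zip (chars.drop k) := by
  intro keys
  induction keys with
  | nil => intro acc k _; simp
  | cons key keys ih =>
    intro acc k hk
    simp only [List.length_cons] at hk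
    have hklt : k < chars.length := by omega
    simp only [List.foldl_cons, pvAssign]
    have : ((k : Int) + 1) = ((k + 1 : Nat) : Int) := by push_cast; ring
    rw [this, ih _ (k + 1) (by omega)]
    rw [PySem.List.pyGetD_eq_getElem chars "" (by positivity) (by exact_mod_cast hklt)]
    rw [List.drop_eq_getElem_cons hklt, List.zip_cons_cons]
    simp

-- ===== VERDICT (by name: the statement is the Claim_ definition above) =====
theorem get_color_to_symbol_dict_spec : Claim_equal_get_color_to_symbol_dict := by
  intro chars dp _
  show get_color_to_symbol_dict chars dp = get_color_to_symbol_dict_alt chars dp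
  simp only [get_color_to_symbol_dict, get_color_to_symbol_dict_alt]
  have h0 : (0 : Int) ≤ min (chars.length : Int) (dp.length : Int) := by positivity
  rw [pv_map_range_take dp _ h0 (by simp),
      PySem.List.slice_to dp h0]
  set n : Nat := (min (chars.length : Int) (dp.length : Int)).toNat with hn
  have hkeys : PySem.List.dedup (dp.take n) = pvUniq (dp.take n) := by
    rw [PySem.List.dedup_eq_ofList, PySem.Set.ofList_eq_foldl,
        pv_foldl_add_eq_uniq (dp.take n) []]
    simp [PySem.Set.contains]
  rw [hkeys]
  have hlen : (pvUniq (dp.take n)).length ≤ chars.length := by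
    have h1 := pv_uniq_length_le (dp.take n).length (dp.take n) le_rfl
    have h2 : (dp.take n).length ≤ n := by simp
    have h3 : n ≤ chars.length := by omega
    omega
  have := pv_assign_eq_zip chars (pvUniq (dp.take n)) [] 0 (by omega)
  simpa using this
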